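-- pv_equiv track=rewrite | github.com/jwujesq8/natural-language-processing | E/bpe.py | mergeBiagramInStringAndCountItsFrequancy
-- ===== SOURCE A (Python) =====
-- def countBiagramsInString(str):
--     biagrams = {}
--     for index, char in enumerate(str):
--         if index<len(str)-1:
--             seq = ''.join(str[index:index+2])
--             biagrams[seq] = biagrams.get(seq, 0) + 1
--     return biagrams
--
-- def mergeBiagramInStringAndCountItsFrequancy(biagram, biagrams, str):
--     i=0
--     length=len(str)
--     while i<=length-2:
--         new_seq = str[i] + str[i+1]
--         if new_seq==biagram:
--             str = str[:i] + [new_seq] + str[i+2:]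
--             length = length-1
--         i=i+1
--     return str, countBiagramsInString(str)
-- ===== SOURCE B (Python) =====
-- def mergeBiagramInStringAndCountItsFrequancy(biagram, biagrams, str):
--     # Single left-to-right pass: rebuild the list, consuming two tokens on a
--     # match (the merged token is never re-merged, matching greedy order).
--     out = []
--     j = 0
--     n = len(str)
--     while j < n:
--         if j + 1 < n and str[j] + str[j + 1] == biagram:
--             out.append(biagram)
--             j += 2
--         else:
--             out.append(str[j])
--             j += 1
--     counts = {}
--     for a, b in zip(out, out[1:]):
--         counts[a + b] = counts.get(a + b, 0) + 1
--     return out, counts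
-- ===== Notes on version B (the rewrite author's own statement) =====
-- stated objective: alternative
-- what changed: Replaces the index-based rescan loop that splices the list on each match (str[:i]+[m]+str[i+2:]) with a single left-to-right pass that rebuilds the list, consuming two tokens on a match, and recounts bigrams over adjacent pairs via zip instead of an index-guarded enumerate loop.
import Mathlib
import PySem

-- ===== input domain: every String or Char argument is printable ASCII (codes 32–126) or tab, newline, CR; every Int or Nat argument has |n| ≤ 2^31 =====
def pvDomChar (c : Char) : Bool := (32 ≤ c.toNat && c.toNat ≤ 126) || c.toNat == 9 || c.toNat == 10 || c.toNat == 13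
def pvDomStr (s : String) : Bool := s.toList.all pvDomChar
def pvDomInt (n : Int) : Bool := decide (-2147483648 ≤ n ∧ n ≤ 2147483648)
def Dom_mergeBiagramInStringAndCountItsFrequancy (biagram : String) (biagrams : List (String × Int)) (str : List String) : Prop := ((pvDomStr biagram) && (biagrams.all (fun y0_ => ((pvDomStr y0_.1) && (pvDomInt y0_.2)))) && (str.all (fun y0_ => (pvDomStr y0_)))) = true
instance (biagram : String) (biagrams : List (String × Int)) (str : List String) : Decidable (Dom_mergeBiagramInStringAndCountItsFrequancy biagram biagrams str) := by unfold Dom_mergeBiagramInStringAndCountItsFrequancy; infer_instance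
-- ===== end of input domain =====

-- B replaces A's index-based splice loop (each match rebuilds the list by
-- slicing) with a single pass that rebuilds the list once, consuming two tokens
-- on a match, and recounts bigrams over adjacent pairs; objective: alternative.

-- ===== PORT A =====
-- body of 'for index, char in enumerate(str): if index < len(str)-1: ...'
-- ('char' is unused in the Python body, so only p.1 appears)
def pvCountBody (str : List String) (d : PySem.Dict String Int) (p : Int × String) : PySem.Dict String Int :=
  if p.1 < (str.length : Int) - 1 then
    let seq := PySem.Str.join "" (PySem.List.slice str (some p.1) (some (p.1 + 2)))
    d.insert seq (d.getD seq 0 + 1)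
  else d

def countBiagramsInString (str : List String) : List (String × Int) :=
  ((PySem.List.enumerate str 0).foldl (pvCountBody str) PySem.Dict.empty).items

-- A's while loop; 'length' is the separate Python variable. str[i]/str[i+1]
-- are in range whenever the loop condition holds with length = len(str) (the
-- only way A reaches them), so pyGetD with default "" is exact there.
def pvMergeLoop (biagram : String) (str : List String) (i length : Int) : List String :=
  if i ≤ length - 2 then
    let newSeq := PySem.List.pyGetD str i "" ++ PySem.List.pyGetD str (i + 1) ""
    if newSeq == biagram then
      pvMergeLoop biagram
        (PySem.List.slice str none (some i) ++ [newSeq] ++ PySem.List.slice str (some (i + 2)) none)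
        (i + 1) (length - 1)
    else pvMergeLoop biagram str (i + 1) length
  else str
termination_by (length - i).toNat
decreasing_by all_goals omega

def mergeBiagramInStringAndCountItsFrequancy (biagram : String) (biagrams : List (String × Int)) (str : List String) : List String × (List (String × Int)) :=
  let str2 := pvMergeLoop biagram str 0 (str.length : Int)
  (str2, countBiagramsInString str2)

-- ===== PORT B =====
-- single pass: on a match emit the merged token and skip its two constituents
def pvMergeAlt (biagram : String) : List String → List String
  | [] => []
  | [x] => [x]
  | x :: y :: rest =>
    if x ++ y == biagram then biagram :: pvMergeAlt biagram rest
    else x :: pvMergeAlt biagram (y :: rest)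
termination_by l => l.length

-- 'for a, b in zip(out, out[1:]): counts[a+b] = counts.get(a+b, 0) + 1'
def pvCountAlt (out : List String) : List (String × Int) :=
  ((out.zip out.tail).foldl
    (fun d p => let s := p.1 ++ p.2; d.insert s (d.getD s 0 + 1))
    PySem.Dict.empty).items

def mergeBiagramInStringAndCountItsFrequancy_alt (biagram : String) (biagrams : List (String × Int)) (str : List String) : List String × (List (String × Int)) :=
  let out := pvMergeAlt biagram str
  (out, pvCountAlt out)

-- ===== PRECONDITION & SPEC =====
def Spec_mergeBiagramInStringAndCountItsFrequancy (biagram : String) (biagrams : List (String × Int)) (str : List String) (out : List String × (List (String × Int))) : Prop := out = mergeBiagramInStringAndCountItsFrequancy_alt biagram biagrams str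
instance (biagram : String) (biagrams : List (String × Int)) (str : List String) (out : List String × (List (String × Int))) : Decidable (Spec_mergeBiagramInStringAndCountItsFrequancy biagram biagrams str out) := by unfold Spec_mergeBiagramInStringAndCountItsFrequancy; infer_instance

-- ===== CLAIM (what is proved, stated in full; the proofs are below) =====
def Claim_equal_mergeBiagramInStringAndCountItsFrequancy : Prop := ∀ (biagram : String) (biagrams : List (String × Int)) (str : List String), Dom_mergeBiagramInStringAndCountItsFrequancy biagram biagrams str → Spec_mergeBiagramInStringAndCountItsFrequancy biagram biagrams str (mergeBiagramInStringAndCountItsFrequancy biagram biagrams str)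

-- ===== LEMMAS AND PROOFS =====

theorem pvJoin_two (a b : String) : PySem.Str.join "" [a, b] = a ++ b := by
  simp [PySem.Str.join, PySem.Chars.join_cons_cons, PySem.Chars.join_singleton]

theorem pvMergeAlt_single (biagram x : String) : pvMergeAlt biagram [x] = [x] := by
  simp [pvMergeAlt]

theorem pvMergeAlt_cons₂ (biagram x y : String) (rest : List String) :
    pvMergeAlt biagram (x :: y :: rest)
      = if x ++ y == biagram then biagram :: pvMergeAlt biagram rest
        else x :: pvMergeAlt biagram (y :: rest) := by
  rw [pvMergeAlt]

theorem pvDrop_succ (l : List String) (n : Nat) : l.drop (n + 1) = (l.drop n).tail := by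
  simp [List.tail_drop]

-- A's while loop, started at index i with length = len(str), leaves the first
-- i tokens untouched and performs B's greedy single pass on the suffix.
theorem pvMergeA_eq (biagram : String) :
    ∀ (k : Nat) (str : List String) (i : Nat), str.length - i ≤ k →
      pvMergeLoop biagram str (i : Int) (str.length : Int)
        = str.take i ++ pvMergeAlt biagram (str.drop i) := by
  intro k
  induction k with
  | zero =>
    intro str i h
    have hle : str.length ≤ i := by omega
    rw [pvMergeLoop, if_neg (by push_cast; omega),
        List.drop_eq_nil_of_le hle, List.take_of_length_le hle]
    simp [pvMergeAlt]
  | succ k ih =>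
    intro str i h
    rcases hd : str.drop i with _ | ⟨a, t⟩
    · have hle : str.length ≤ i := List.drop_eq_nil_iff.mp hd
      rw [pvMergeLoop, if_neg (by push_cast; omega), List.take_of_length_le hle]
      simp [pvMergeAlt]
    · have hlen : (str.drop i).length = str.length - i := List.length_drop
      rcases ht : t with _ | ⟨b, rest⟩
      · -- suffix of length one: loop condition fails
        subst ht
        have h1 : str.length = i + 1 := by rw [hd] at hlen; simp at hlen; omega
        rw [pvMergeLoop, if_neg (by push_cast; omega), pvMergeAlt_single]
        calc str = str.take i ++ str.drop i := (List.take_append_drop i str).symm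
          _ = str.take i ++ [a] := by rw [hd]
      · subst ht
        have h2 : i + 2 ≤ str.length := by rw [hd] at hlen; simp at hlen; omega
        have hga : str[i]? = some a := by
          have h0 : (List.drop i str)[0]? = some a := by rw [hd]; rfl
          rw [List.getElem?_drop] at h0; simpa using h0
        have hgb : str[i + 1]? = some b := by
          have h0 : (List.drop i str)[1]? = some b := by rw [hd]; rfl
          rw [List.getElem?_drop] at h0; simpa using h0
        have hdrop1 : str.drop (i + 1) = b :: rest := by rw [pvDrop_succ, hd]; rfl
        have hdrop2 : str.drop (i + 2) = rest := by
          have h21 : i + 2 = (i + 1) + 1 := by omega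
          rw [h21, pvDrop_succ, hdrop1]; rfl
        have hA : PySem.List.pyGetD str (i : Int) "" = a := by
          rw [PySem.List.pyGetD_natCast]; simp [List.getD, hga]
        have hB : PySem.List.pyGetD str ((i : Int) + 1) "" = b := by
          have hc : ((i : Int) + 1) = ((i + 1 : Nat) : Int) := by push_cast; ring
          rw [hc, PySem.List.pyGetD_natCast]; simp [List.getD, hgb]
        rw [pvMergeLoop, if_pos (by push_cast; omega)]
        simp only [hA, hB]
        by_cases hab : a ++ b = biagram
        · rw [if_pos (by simp [hab])]
          have hs1 : PySem.List.slice str none (some (i : Int)) = str.take i :=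
            PySem.List.slice_to_natCast str i
          have hs2 : PySem.List.slice str (some ((i : Int) + 2)) none = rest := by
            have hc : ((i : Int) + 2) = ((i + 2 : Nat) : Int) := by push_cast; ring
            rw [hc, PySem.List.slice_from_natCast, hdrop2]
          rw [hs1, hs2]
          have htl : (str.take i).length = i := by
            rw [List.length_take]; omega
          have hLlen : ((str.take i ++ [a ++ b] ++ rest).length : Int)
              = (str.length : Int) - 1 := by
            simp [List.length_append, htl]
            push_cast
            rw [hd] at hlen; simp at hlen; omega
          have hc1 : ((i : Int) + 1) = ((i + 1 : Nat) : Int) := by push_cast; ring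
          rw [hc1, ← hLlen]
          have hk : (str.take i ++ [a ++ b] ++ rest).length - (i + 1) ≤ k := by
            simp [List.length_append, htl]
            rw [hd] at hlen; simp at hlen; omega
          rw [ih _ (i + 1) hk]
          have hpre : ((str.take i ++ [a ++ b]).length) = i + 1 := by
            simp [htl]
          have htk : (str.take i ++ [a ++ b] ++ rest).take (i + 1) = str.take i ++ [a ++ b] :=
            List.take_left' hpre
          have hdk : (str.take i ++ [a ++ b] ++ rest).drop (i + 1) = rest :=
            List.drop_left' hpre
          rw [htk, hdk, pvMergeAlt_cons₂,
              if_pos (show (a ++ b == biagram) = true by simp [hab])]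
          rw [← hab]
          simp
        · rw [if_neg (by simp [hab])]
          have hc1 : ((i : Int) + 1) = ((i + 1 : Nat) : Int) := by push_cast; ring
          rw [hc1, ih str (i + 1) (by omega)]
          have htk : str.take (i + 1) = str.take i ++ [a] := by
            rw [List.take_succ, hga]; rfl
          rw [htk, hdrop1, pvMergeAlt_cons₂,
              if_neg (show ¬(a ++ b == biagram) = true by simp [hab])]
          simp

-- A's counting loop over 'enumerate', restricted to the suffix str.drop i,
-- folds exactly the adjacent pairs of that suffix (B's zip).
theorem pvCountA_aux (str : List String) :
    ∀ (k : Nat) (i : Nat) (d : PySem.Dict String Int), str.length - i ≤ k →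
      (PySem.List.enumerate (str.drop i) (i : Int)).foldl (pvCountBody str) d
        = ((str.drop i).zip (str.drop i).tail).foldl
            (fun d p => let s := p.1 ++ p.2; d.insert s (d.getD s 0 + 1)) d := by
  intro k
  induction k with
  | zero =>
    intro i d h
    have hle : str.length ≤ i := by omega
    rw [List.drop_eq_nil_of_le hle]
    simp [PySem.List.enumerate_nil]
  | succ k ih =>
    intro i d h
    rcases hd : str.drop i with _ | ⟨a, t⟩
    · simp [PySem.List.enumerate_nil]
    · have hlen : (str.drop i).length = str.length - i := List.length_drop
      rcases ht : t with _ | ⟨b, rest⟩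
      · -- last element: the 'index < len(str)-1' guard is false
        subst ht
        have h1 : str.length = i + 1 := by rw [hd] at hlen; simp at hlen; omega
        rw [PySem.List.enumerate_cons]
        simp [PySem.List.enumerate_nil, pvCountBody, h1]
      · subst ht
        have h2 : i + 2 ≤ str.length := by rw [hd] at hlen; simp at hlen; omega
        have hdrop1 : str.drop (i + 1) = b :: rest := by rw [pvDrop_succ, hd]; rfl
        have hseq : PySem.Str.join ""
            (PySem.List.slice str (some (i : Int)) (some ((i : Int) + 2))) = a ++ b := by
          have hc : ((i : Int) + 2) = ((i : Int) + ((2 : Nat) : Int)) := by push_cast; ring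
          rw [hc, PySem.List.slice_natCast_add, hd]
          simp [pvJoin_two]
        rw [PySem.List.enumerate_cons]
        simp only [List.foldl_cons]
        have hcond : pvCountBody str d ((i : Int), a)
            = d.insert (a ++ b) (d.getD (a ++ b) 0 + 1) := by
          rw [pvCountBody]
          rw [if_pos (by push_cast; omega)]
          simp only [hseq]
        rw [hcond]
        have hc1 : ((i : Int) + 1) = ((i + 1 : Nat) : Int) := by push_cast; ring
        rw [hc1, ← hdrop1, ih (i + 1) _ (by omega)]
        rw [hdrop1]
        simp

theorem pvCount_eq (str : List String) : countBiagramsInString str = pvCountAlt str := by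
  unfold countBiagramsInString pvCountAlt
  have h0 := pvCountA_aux str str.length 0 PySem.Dict.empty (by omega)
  simp only [List.drop_zero] at h0
  have hz : ((0 : Nat) : Int) = 0 := rfl
  rw [← hz, h0]
  rfl

-- ===== VERDICT (by name: the statement is the Claim_ definition above) =====
theorem mergeBiagramInStringAndCountItsFrequancy_spec : Claim_equal_mergeBiagramInStringAndCountItsFrequancy := by
  intro biagram biagrams str _
  unfold Spec_mergeBiagramInStringAndCountItsFrequancy
  unfold mergeBiagramInStringAndCountItsFrequancy mergeBiagramInStringAndCountItsFrequancy_alt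
  have hm := pvMergeA_eq biagram str.length str 0 (by omega)
  have hz : ((0 : Nat) : Int) = 0 := rfl
  rw [hz] at hm
  simp only [List.take_zero, List.drop_zero, List.nil_append] at hm
  simp only [hm, pvCount_eq]
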